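-- pv_equiv track=rewrite | github.com/charparr/raster-monte-carlo | raster_monte_carlo.py | get_spatial_window_corner_coords
-- ===== SOURCE A (Python) =====
-- def get_spatial_window_corner_coords(aois, d):
--     """Summary
--
--     Args:
--         aois (TYPE): Description
--         d (TYPE): Description
--
--     Returns:
--         TYPE: Description
--     """
--     # format is row start stop
--     tops = [x[0][0] for x in aois]
--     bottoms = [x[0][1] for x in aois]
--     lefts = [x[1][0] for x in aois]
--     rights = [x[1][1] for x in aois]
--
--     # in arr coords
--     # top is row start
--     # bot is row stop
--     # l is col start
--     # r is coll stop
--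
--     tls = [(t, l) for t, l in zip(tops, lefts)]
--     trs = [(t, r) for t, r in zip(tops, rights)]
--     brs = [(b, r) for b, r in zip(bottoms, rights)]
--     bls = [(b, l) for b, l in zip(bottoms, lefts)]
--
--     # ok so format for geo corners is intended for src sample
--     # src sample takes pairs of xy coordinates
--     c_tls = [(d['x_bound'] + tl[1], d['y_bound'] - tl[0]) for tl in tls]
--     c_trs = [(d['x_bound'] + tr[1], d['y_bound'] - tr[0]) for tr in trs]
--     c_brs = [(d['x_bound'] + br[1], d['y_bound'] - br[0]) for br in brs]
--     c_bls = [(d['x_bound'] + bl[1], d['y_bound'] - bl[0]) for bl in bls]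
--
--     geo_corners = [[i, j, k, l] for i, j, k, l in zip(c_tls, c_trs,
--                                                       c_brs, c_bls)]
--     return geo_corners
-- ===== SOURCE B (Python) =====
-- def get_spatial_window_corner_coords(aois, d):
--     geo_corners = []
--     for x in aois:
--         (t, b), (l, r) = x
--         xb = d['x_bound']
--         yb = d['y_bound']
--         geo_corners.append([(xb + l, yb - t), (xb + r, yb - t),
--                             (xb + r, yb - b), (xb + l, yb - b)])
--     return geo_corners
-- ===== Notes on version B (the rewrite author's own statement) =====
-- stated objective: simpler
-- what changed: Replaces the twelve staged comprehensions (four column lists, four zip-built corner lists, four geo lists, final 4-way zip) with one loop over aois that emits each four-corner list directly.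
import Mathlib
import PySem

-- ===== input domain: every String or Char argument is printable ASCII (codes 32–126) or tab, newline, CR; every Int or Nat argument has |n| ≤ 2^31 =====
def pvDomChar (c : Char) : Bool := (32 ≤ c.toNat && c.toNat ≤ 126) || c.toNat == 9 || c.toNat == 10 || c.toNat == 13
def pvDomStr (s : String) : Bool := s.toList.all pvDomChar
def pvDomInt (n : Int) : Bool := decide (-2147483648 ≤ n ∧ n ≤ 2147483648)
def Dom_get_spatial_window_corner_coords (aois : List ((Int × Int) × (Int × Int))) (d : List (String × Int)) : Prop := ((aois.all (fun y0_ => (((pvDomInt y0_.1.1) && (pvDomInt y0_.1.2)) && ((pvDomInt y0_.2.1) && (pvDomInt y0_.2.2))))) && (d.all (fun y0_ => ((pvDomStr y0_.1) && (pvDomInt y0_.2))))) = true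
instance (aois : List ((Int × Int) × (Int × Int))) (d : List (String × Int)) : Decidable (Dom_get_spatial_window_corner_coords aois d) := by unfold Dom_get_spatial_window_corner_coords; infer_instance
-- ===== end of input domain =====

-- B replaces A's twelve staged comprehensions/zips with one direct loop over aois (objective: simpler).

-- ===== PORT A =====
def get_spatial_window_corner_coords (aois : List ((Int × Int) × (Int × Int))) (d : List (String × Int)) : List (List (Int × Int)) :=
  let dd := PySem.Dict.ofList d
  let tops := aois.map (fun x => x.1.1)
  let bottoms := aois.map (fun x => x.1.2)
  let lefts := aois.map (fun x => x.2.1)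
  let rights := aois.map (fun x => x.2.2)
  let tls := tops.zip lefts
  let trs := tops.zip rights
  let brs := bottoms.zip rights
  let bls := bottoms.zip lefts
  -- d['x_bound'] / d['y_bound'] : evaluated only inside the (possibly empty) comprehensions;
  -- Pre_ guarantees both keys are present whenever aois ≠ [], so getD is exact here
  let c_tls := tls.map (fun tl => (PySem.Dict.getD dd "x_bound" 0 + tl.2, PySem.Dict.getD dd "y_bound" 0 - tl.1))
  let c_trs := trs.map (fun tr => (PySem.Dict.getD dd "x_bound" 0 + tr.2, PySem.Dict.getD dd "y_bound" 0 - tr.1))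
  let c_brs := brs.map (fun br => (PySem.Dict.getD dd "x_bound" 0 + br.2, PySem.Dict.getD dd "y_bound" 0 - br.1))
  let c_bls := bls.map (fun bl => (PySem.Dict.getD dd "x_bound" 0 + bl.2, PySem.Dict.getD dd "y_bound" 0 - bl.1))
  (c_tls.zip (c_trs.zip (c_brs.zip c_bls))).map (fun p => [p.1, p.2.1, p.2.2.1, p.2.2.2])

-- ===== PORT B =====
def pvAltGo (dd : PySem.Dict String Int) : List ((Int × Int) × (Int × Int)) → List (List (Int × Int))
  | [] => []
  | x :: rest =>
    let t := x.1.1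
    let b := x.1.2
    let l := x.2.1
    let r := x.2.2
    let xb := PySem.Dict.getD dd "x_bound" 0
    let yb := PySem.Dict.getD dd "y_bound" 0
    [(xb + l, yb - t), (xb + r, yb - t), (xb + r, yb - b), (xb + l, yb - b)] :: pvAltGo dd rest

def get_spatial_window_corner_coords_alt (aois : List ((Int × Int) × (Int × Int))) (d : List (String × Int)) : List (List (Int × Int)) :=
  pvAltGo (PySem.Dict.ofList d) aois

-- ===== PRECONDITION & SPEC =====
-- Pre_ excludes exactly the inputs where A raises KeyError: aois nonempty while 'x_bound' or 'y_bound' is missing from d.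
def Pre_get_spatial_window_corner_coords (aois : List ((Int × Int) × (Int × Int))) (d : List (String × Int)) : Prop :=
  aois = [] ∨ ((PySem.Dict.ofList d).contains "x_bound" ∧ (PySem.Dict.ofList d).contains "y_bound")
instance (aois : List ((Int × Int) × (Int × Int))) (d : List (String × Int)) : Decidable (Pre_get_spatial_window_corner_coords aois d) := by unfold Pre_get_spatial_window_corner_coords; infer_instance
def pvWitness_get_spatial_window_corner_coords : (List ((Int × Int) × (Int × Int))) × (List (String × Int)) :=
  ([((0, 1), (2, 3)), ((5, 7), (1, 4))], [("x_bound", 10), ("y_bound", 20)])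

def Spec_get_spatial_window_corner_coords (aois : List ((Int × Int) × (Int × Int))) (d : List (String × Int)) (out : List (List (Int × Int))) : Prop := out = get_spatial_window_corner_coords_alt aois d
instance (aois : List ((Int × Int) × (Int × Int))) (d : List (String × Int)) (out : List (List (Int × Int))) : Decidable (Spec_get_spatial_window_corner_coords aois d out) := by unfold Spec_get_spatial_window_corner_coords; infer_instance

-- ===== CLAIM (what is proved, stated in full; the proofs are below) =====
def Claim_equal_get_spatial_window_corner_coords : Prop := ∀ (aois : List ((Int × Int) × (Int × Int))) (d : List (String × Int)), Dom_get_spatial_window_corner_coords aois d → Pre_get_spatial_window_corner_coords aois d → Spec_get_spatial_window_corner_coords aois d (get_spatial_window_corner_coords aois d)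

-- ===== LEMMAS AND PROOFS =====
theorem pv_main (aois : List ((Int × Int) × (Int × Int))) (d : List (String × Int)) :
    get_spatial_window_corner_coords aois d = get_spatial_window_corner_coords_alt aois d := by
  unfold get_spatial_window_corner_coords get_spatial_window_corner_coords_alt
  induction aois with
  | nil => rfl
  | cons x rest ih => simp_all [pvAltGo]

-- ===== VERDICT (by name: the statement is the Claim_ definition above) =====
theorem get_spatial_window_corner_coords_spec : Claim_equal_get_spatial_window_corner_coords := by
  intro aois d _ _
  exact pv_main aois d
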